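-- pv_equiv track=rewrite | github.com/CiscoDevNet/sastre | cisco_sdwan/tasks/implementation/_attach_detach.py | device_maps
-- ===== SOURCE A (Python) =====
-- from typing import Union, Optional, List, Dict, Tuple, Set, Sequence
-- from collections.abc import Mapping, Callable, Iterable
--
-- def device_maps(selected_devices_iter: Iterable[Tuple[str, str]],
--                 vsmart_uuid_set: Tuple[Set[str], Set[str]],
--                 cedge_uuid_set: Tuple[Set[str], Set[str]],
--                 vedge_uuid_set: Tuple[Set[str], Set[str]]) -> Tuple[Mapping[str, str], Mapping[str, str], Mapping[str, str],
--                                                                     Mapping[str, str], Mapping[str, str], Mapping[str, str]]: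
--     selected_devices = dict(selected_devices_iter)
--     selected_devices_keys = selected_devices.keys()
--     return ({uuid: selected_devices[uuid] for uuid in selected_devices_keys & vsmart_uuid_set[0]},
--             {uuid: selected_devices[uuid] for uuid in selected_devices_keys & vsmart_uuid_set[1]},
--             {uuid: selected_devices[uuid] for uuid in selected_devices_keys & cedge_uuid_set[0]},
--             {uuid: selected_devices[uuid] for uuid in selected_devices_keys & cedge_uuid_set[1]},
--             {uuid: selected_devices[uuid] for uuid in selected_devices_keys & vedge_uuid_set[0]},
--             {uuid: selected_devices[uuid] for uuid in selected_devices_keys & vedge_uuid_set[1]})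
-- ===== SOURCE B (Python) =====
-- def device_maps(selected_devices_iter,
--                 vsmart_uuid_set,
--                 cedge_uuid_set,
--                 vedge_uuid_set):
--     # One device-driven pass: instead of six set-intersections, walk the
--     # selected devices once and drop each into every matching bucket.
--     uuid_sets = (vsmart_uuid_set[0], vsmart_uuid_set[1],
--                  cedge_uuid_set[0], cedge_uuid_set[1],
--                  vedge_uuid_set[0], vedge_uuid_set[1])
--     results = ({}, {}, {}, {}, {}, {})
--     for uuid, value in dict(selected_devices_iter).items():
--         for uuid_set, result in zip(uuid_sets, results):
--             if uuid in uuid_set: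
--                 result[uuid] = value
--     return results
-- ===== Notes on version B (the rewrite author's own statement) =====
-- stated objective: alternative
-- what changed: Replaces A's six independent key-set intersections (each building its own dict comprehension) with one device-driven pass over the selected devices that tests each uuid against the six sets and appends to all matching result dicts.
import Mathlib
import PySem

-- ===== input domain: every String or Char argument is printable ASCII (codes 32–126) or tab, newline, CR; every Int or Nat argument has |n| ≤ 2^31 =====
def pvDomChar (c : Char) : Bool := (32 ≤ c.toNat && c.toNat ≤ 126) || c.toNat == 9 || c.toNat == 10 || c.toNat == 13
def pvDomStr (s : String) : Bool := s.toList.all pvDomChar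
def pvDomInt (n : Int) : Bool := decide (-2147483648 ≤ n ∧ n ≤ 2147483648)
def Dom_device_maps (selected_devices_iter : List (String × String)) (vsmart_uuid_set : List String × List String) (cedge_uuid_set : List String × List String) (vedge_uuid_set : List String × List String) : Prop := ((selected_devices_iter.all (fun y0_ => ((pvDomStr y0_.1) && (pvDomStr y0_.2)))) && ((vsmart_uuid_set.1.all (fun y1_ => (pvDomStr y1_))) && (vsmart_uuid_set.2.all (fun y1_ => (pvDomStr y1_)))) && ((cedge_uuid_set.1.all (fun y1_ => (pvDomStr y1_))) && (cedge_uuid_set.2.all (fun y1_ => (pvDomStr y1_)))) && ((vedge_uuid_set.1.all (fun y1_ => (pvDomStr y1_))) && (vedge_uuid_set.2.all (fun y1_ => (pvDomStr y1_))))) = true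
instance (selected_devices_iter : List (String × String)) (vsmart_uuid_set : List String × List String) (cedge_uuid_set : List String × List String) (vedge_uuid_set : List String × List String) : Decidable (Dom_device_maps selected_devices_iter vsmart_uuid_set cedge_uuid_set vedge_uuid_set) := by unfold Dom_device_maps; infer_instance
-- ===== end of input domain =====

-- B replaces A's six key-set intersections with a single device-driven pass that appends each
-- item to every bucket whose uuid set contains it (objective: alternative decomposition).


-- ===== PORT A =====
-- dict(selected_devices_iter); 'keys & set' is PySem.Set.inter (keys order; the keys list is
-- duplicate-free, so each comprehension is the map below — exact up to set/dict iteration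
-- order, which the dict outputs are compared without); sd[uuid] is getD with an unused default,
-- exact because every uuid taken from the intersection is a key of the dict.
def device_maps (selected_devices_iter : List (String × String)) (vsmart_uuid_set : List String × List String) (cedge_uuid_set : List String × List String) (vedge_uuid_set : List String × List String) : (List (String × String)) × (List (String × String)) × (List (String × String)) × (List (String × String)) × (List (String × String)) × (List (String × String)) :=
  let selected_devices := selected_devices_iter.foldl (fun d p => d.insert p.1 p.2) (PySem.Dict.empty)
  let selected_devices_keys := selected_devices.keys
  let comp := fun (s : List String) =>
    (PySem.Set.inter selected_devices_keys s).map (fun uuid => (uuid, selected_devices.getD uuid ""))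
  (comp vsmart_uuid_set.1, comp vsmart_uuid_set.2,
   comp cedge_uuid_set.1, comp cedge_uuid_set.2,
   comp vedge_uuid_set.1, comp vedge_uuid_set.2)

-- ===== PORT B =====
-- one pass over dict(selected_devices_iter).items(): six accumulators, each item appended to
-- every bucket whose uuid set contains its key.
def device_maps_alt (selected_devices_iter : List (String × String)) (vsmart_uuid_set : List String × List String) (cedge_uuid_set : List String × List String) (vedge_uuid_set : List String × List String) : (List (String × String)) × (List (String × String)) × (List (String × String)) × (List (String × String)) × (List (String × String)) × (List (String × String)) :=
  let selected := selected_devices_iter.foldl (fun d p => d.insert p.1 p.2) (PySem.Dict.empty)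
  selected.items.foldl
    (fun acc p =>
      (if vsmart_uuid_set.1.contains p.1 then acc.1 ++ [p] else acc.1,
       if vsmart_uuid_set.2.contains p.1 then acc.2.1 ++ [p] else acc.2.1,
       if cedge_uuid_set.1.contains p.1 then acc.2.2.1 ++ [p] else acc.2.2.1,
       if cedge_uuid_set.2.contains p.1 then acc.2.2.2.1 ++ [p] else acc.2.2.2.1,
       if vedge_uuid_set.1.contains p.1 then acc.2.2.2.2.1 ++ [p] else acc.2.2.2.2.1,
       if vedge_uuid_set.2.contains p.1 then acc.2.2.2.2.2 ++ [p] else acc.2.2.2.2.2))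
    ([], [], [], [], [], [])

-- ===== PRECONDITION & SPEC =====
def Spec_device_maps (selected_devices_iter : List (String × String)) (vsmart_uuid_set : List String × List String) (cedge_uuid_set : List String × List String) (vedge_uuid_set : List String × List String) (out : (List (String × String)) × (List (String × String)) × (List (String × String)) × (List (String × String)) × (List (String × String)) × (List (String × String))) : Prop := out = device_maps_alt selected_devices_iter vsmart_uuid_set cedge_uuid_set vedge_uuid_set
instance (selected_devices_iter : List (String × String)) (vsmart_uuid_set : List String × List String) (cedge_uuid_set : List String × List String) (vedge_uuid_set : List String × List String) (out : (List (String × String)) × (List (String × String)) × (List (String × String)) × (List (String × String)) × (List (String × String)) × (List (String × String))) : Decidable (Spec_device_maps selected_devices_iter vsmart_uuid_set cedge_uuid_set vedge_uuid_set out) := by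
  unfold Spec_device_maps
  haveI h2 : DecidableEq ((List (String × String)) × (List (String × String))) := instDecidableEqProd
  haveI h3 : DecidableEq ((List (String × String)) × (List (String × String)) × (List (String × String))) := @instDecidableEqProd _ _ _ h2
  haveI h4 : DecidableEq ((List (String × String)) × (List (String × String)) × (List (String × String)) × (List (String × String))) := @instDecidableEqProd _ _ _ h3
  haveI h5 : DecidableEq ((List (String × String)) × (List (String × String)) × (List (String × String)) × (List (String × String)) × (List (String × String))) := @instDecidableEqProd _ _ _ h4
  haveI h6 : DecidableEq ((List (String × String)) × (List (String × String)) × (List (String × String)) × (List (String × String)) × (List (String × String)) × (List (String × String))) := @instDecidableEqProd _ _ _ h5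
  exact h6 out (device_maps_alt selected_devices_iter vsmart_uuid_set cedge_uuid_set vedge_uuid_set)

-- ===== CLAIM (what is proved, stated in full; the proofs are below) =====
def Claim_equal_device_maps : Prop := ∀ (selected_devices_iter : List (String × String)) (vsmart_uuid_set : List String × List String) (cedge_uuid_set : List String × List String) (vedge_uuid_set : List String × List String), Dom_device_maps selected_devices_iter vsmart_uuid_set cedge_uuid_set vedge_uuid_set → Spec_device_maps selected_devices_iter vsmart_uuid_set cedge_uuid_set vedge_uuid_set (device_maps selected_devices_iter vsmart_uuid_set cedge_uuid_set vedge_uuid_set)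

-- ===== LEMMAS AND PROOFS =====

-- B's six-accumulator fold computes the six filters, each bucket independently.
theorem foldl_six_filters (s1 s2 s3 s4 s5 s6 : List String) (l : List (String × String))
    (a1 a2 a3 a4 a5 a6 : List (String × String)) :
    l.foldl
      (fun acc p =>
        (if s1.contains p.1 then acc.1 ++ [p] else acc.1,
         if s2.contains p.1 then acc.2.1 ++ [p] else acc.2.1,
         if s3.contains p.1 then acc.2.2.1 ++ [p] else acc.2.2.1,
         if s4.contains p.1 then acc.2.2.2.1 ++ [p] else acc.2.2.2.1,
         if s5.contains p.1 then acc.2.2.2.2.1 ++ [p] else acc.2.2.2.2.1,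
         if s6.contains p.1 then acc.2.2.2.2.2 ++ [p] else acc.2.2.2.2.2))
      (a1, a2, a3, a4, a5, a6) =
      (a1 ++ l.filter (fun p => s1.contains p.1),
       a2 ++ l.filter (fun p => s2.contains p.1),
       a3 ++ l.filter (fun p => s3.contains p.1),
       a4 ++ l.filter (fun p => s4.contains p.1),
       a5 ++ l.filter (fun p => s5.contains p.1),
       a6 ++ l.filter (fun p => s6.contains p.1)) := by
  induction l generalizing a1 a2 a3 a4 a5 a6 with
  | nil => simp
  | cons p t ih =>
    simp only [List.foldl_cons, List.filter_cons, ih, Prod.mk.injEq]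
    refine ⟨?_, ?_, ?_, ?_, ?_, ?_⟩ <;> split <;> simp

-- A's comprehension over 'keys & s' is the filter of the dict's items by membership in s.
theorem inter_map_eq_items_filter (d : PySem.Dict String String) (hnd : d.keys.Nodup)
    (s : List String) :
    (PySem.Set.inter d.keys s).map (fun uuid => (uuid, d.getD uuid "")) =
      d.items.filter (fun p => s.contains p.1) := by
  rw [PySem.Dict.items_eq_map_keys d hnd ""]
  rw [List.filter_map]
  simp [PySem.Set.inter, Function.comp_def]


-- ===== VERDICT (by name: the statement is the Claim_ definition above) =====
theorem device_maps_spec : Claim_equal_device_maps := by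
  intro sdi vs ce ve _
  unfold Spec_device_maps device_maps device_maps_alt
  have hnd : (sdi.foldl (fun d p => d.insert p.1 p.2) (PySem.Dict.empty : PySem.Dict String String)).keys.Nodup :=
    PySem.Dict.nodup_keys_foldl_insert_key sdi Prod.fst _ _ PySem.Dict.nodup_keys_empty
  rw [foldl_six_filters]
  simp only [List.nil_append]
  rw [inter_map_eq_items_filter _ hnd, inter_map_eq_items_filter _ hnd,
      inter_map_eq_items_filter _ hnd, inter_map_eq_items_filter _ hnd,
      inter_map_eq_items_filter _ hnd, inter_map_eq_items_filter _ hnd]
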